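-- pv_equiv track=rewrite | github.com/elisaot/Master-Project | data/results/get_tables.py | ascii_to_norwegian
-- ===== SOURCE A (Python) =====
-- def ascii_to_norwegian(s):
--     if not isinstance(s, str):
--         return s
--     mapping = {
--         "aa": "å",
--         "ae": "æ",
--         "oe": "ø",
--         "AA": "Å",
--         "AE": "Æ",
--         "OE": "Ø",
--     }
--     for ascii_seq, norwegian_char in mapping.items():
--         s = s.replace(ascii_seq, norwegian_char)
--     return s
-- ===== SOURCE B (Python) =====
-- def ascii_to_norwegian(s):
--     if not isinstance(s, str):
--         return s
--     mapping = {
--         "aa": "å",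
--         "ae": "æ",
--         "oe": "ø",
--         "AA": "Å",
--         "AE": "Æ",
--         "OE": "Ø",
--     }
--     out = []
--     i = 0
--     n = len(s)
--     while i < n:
--         pair = s[i:i + 2]
--         if pair in mapping:
--             out.append(mapping[pair])
--             i += 2
--         else:
--             out.append(s[i])
--             i += 1
--     return "".join(out)
-- ===== Notes on version B (the rewrite author's own statement) =====
-- stated objective: alternative
-- what changed: Replaces A's six sequential full-string str.replace passes with a single left-to-right scan that looks each two-character window up in the digraph table, emitting the Norwegian character and skipping two characters on a hit.
import Mathlib
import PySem

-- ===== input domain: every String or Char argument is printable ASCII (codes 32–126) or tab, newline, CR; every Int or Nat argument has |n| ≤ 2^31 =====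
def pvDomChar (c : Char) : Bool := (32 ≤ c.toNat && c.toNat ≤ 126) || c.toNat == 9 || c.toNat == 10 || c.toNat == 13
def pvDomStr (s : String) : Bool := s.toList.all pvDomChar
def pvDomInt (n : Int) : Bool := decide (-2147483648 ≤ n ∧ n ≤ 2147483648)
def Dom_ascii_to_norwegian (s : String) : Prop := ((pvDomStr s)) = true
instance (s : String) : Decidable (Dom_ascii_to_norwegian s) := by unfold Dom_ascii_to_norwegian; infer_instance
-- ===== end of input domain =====

-- B replaces A's six sequential full-string str.replace passes by one left-to-right scan with a
-- digraph lookup table (objective: alternative single-pass decomposition, same observable result).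

-- ===== PORT A =====
-- A's dict literal 'mapping' (insertion order of .items())
def norwMapping : PySem.Dict String String :=
  PySem.Dict.ofList [("aa", "å"), ("ae", "æ"), ("oe", "ø"), ("AA", "Å"), ("AE", "Æ"), ("OE", "Ø")]

-- the for-loop over mapping.items(): s = s.replace(ascii_seq, norwegian_char)
def ascii_to_norwegian (s : String) : String :=
  norwMapping.items.foldl (fun acc p => PySem.Str.replace acc p.1 p.2) s

-- ===== PORT B =====
-- B's dict literal 'mapping', keyed by the two-character slice s[i:i+2]
def norwMapB : PySem.Dict (List Char) (List Char) :=
  PySem.Dict.ofList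
    [(['a','a'], ['å']), (['a','e'], ['æ']), (['o','e'], ['ø']),
     (['A','A'], ['Å']), (['A','E'], ['Æ']), (['O','E'], ['Ø'])]

-- B's while loop: pair = s[i:i+2]; on a hit append mapping[pair], i += 2; else append s[i], i += 1
def altGo : List Char → List Char
  | [] => []
  | c :: rest =>
    match norwMapB.get? ((c :: rest).take 2) with
    | some v => v ++ altGo (rest.drop 1)
    | none => c :: altGo rest
termination_by l => l.length
decreasing_by
  · simp only [List.length_cons, List.length_drop]; omega
  · simp only [List.length_cons]; omega

def ascii_to_norwegian_alt (s : String) : String := String.ofList (altGo s.toList)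

-- ===== PRECONDITION & SPEC =====
def Spec_ascii_to_norwegian (s : String) (out : String) : Prop := out = ascii_to_norwegian_alt s
instance (s : String) (out : String) : Decidable (Spec_ascii_to_norwegian s out) := by unfold Spec_ascii_to_norwegian; infer_instance

-- ===== CLAIM (what is proved, stated in full; the proofs are below) =====
def Claim_equal_ascii_to_norwegian : Prop := ∀ (s : String), Dom_ascii_to_norwegian s → Spec_ascii_to_norwegian s (ascii_to_norwegian s)

-- ===== LEMMAS AND PROOFS =====

-- structural form of Python's str.replace for a two-char pattern and one-char replacement
def rep2 (a b v : Char) : List Char → List Char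
  | [] => []
  | [c] => [c]
  | c :: d :: t => if c = a ∧ d = b then v :: rep2 a b v t else c :: rep2 a b v (d :: t)
termination_by l => l.length

theorem go2 (a b v : Char) : ∀ (fuel : Nat) (l acc : List Char), l.length ≤ fuel →
    PySem.Chars.replace.go [a,b] [v] fuel l acc = acc.reverse ++ rep2 a b v l := by
  intro fuel
  induction fuel with
  | zero =>
    intro l acc h
    have hl : l = [] := by cases l <;> simp_all
    subst hl
    simp [PySem.Chars.replace.go, rep2]
  | succ n ih =>
    intro l acc h
    match l with
    | [] => simp [PySem.Chars.replace.go, rep2]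
    | [c] =>
      have hp : ([a,b].isPrefixOf [c]) = false := by simp [List.isPrefixOf]
      rw [PySem.Chars.replace.go]
      simp only [hp, Bool.false_eq_true, if_false]
      rw [ih [] (c :: acc) (by simp)]
      simp [rep2]
    | c :: d :: t =>
      by_cases hcd : c = a ∧ d = b
      · obtain ⟨rfl, rfl⟩ := hcd
        have hp : ([c,d].isPrefixOf (c :: d :: t)) = true := by simp [List.isPrefixOf]
        rw [PySem.Chars.replace.go]
        simp only [hp, if_true]
        rw [show List.drop ([c,d] : List Char).length (c :: d :: t) = t by simp]
        rw [ih t (([v] : List Char).reverse ++ acc) (by simp at h ⊢; omega)]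
        simp [rep2]
      · have hp : ([a,b].isPrefixOf (c :: d :: t)) = false := by
          simp [List.isPrefixOf]; intro h1 h2; exact absurd ⟨h1.symm, h2.symm⟩ hcd
        rw [PySem.Chars.replace.go]
        simp only [hp, Bool.false_eq_true, if_false]
        rw [ih (d :: t) (c :: acc) (by simpa using Nat.le_of_succ_le_succ h)]
        simp [rep2, hcd]

theorem replace_eq_rep2 (a b v : Char) (l : List Char) :
    PySem.Chars.replace l [a,b] [v] = rep2 a b v l := by
  rw [PySem.Chars.replace]
  simp only [List.isEmpty_cons, Bool.false_eq_true, if_false]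
  simpa using go2 a b v l.length l [] le_rfl

theorem rep2_match (a b v : Char) (t : List Char) :
    rep2 a b v (a :: b :: t) = v :: rep2 a b v t := by simp [rep2]
theorem rep2_miss {a b c d : Char} (v : Char) (t : List Char) (h : ¬(c = a ∧ d = b)) :
    rep2 a b v (c :: d :: t) = c :: rep2 a b v (d :: t) := by
  rw [rep2, if_neg h]
theorem rep2_cons_ne {a c : Char} (b v : Char) (l : List Char) (h : c ≠ a) :
    rep2 a b v (c :: l) = c :: rep2 a b v l := by
  cases l with
  | nil => simp [rep2]
  | cons y t => exact rep2_miss v t (by tauto)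
theorem rep2_cons_of {a b c : Char} (v : Char) (l : List Char)
    (h : ∀ d', l.head? = some d' → ¬(c = a ∧ d' = b)) :
    rep2 a b v (c :: l) = c :: rep2 a b v l := by
  cases l with
  | nil => simp [rep2]
  | cons y t => exact rep2_miss v t (h y rfl)
theorem rep2_head? (a b v : Char) (l : List Char) :
    (rep2 a b v l).head? = l.head? ∨ (rep2 a b v l).head? = some v := by
  match l with
  | [] => left; simp [rep2]
  | [c] => left; simp [rep2]
  | c :: d :: t =>
    by_cases h : c = a ∧ d = b
    · obtain ⟨rfl, rfl⟩ := h
      rw [rep2_match]; right; rfl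
    · rw [rep2_miss v t h]; left; rfl

-- the composition of A's six replaces, on the char-list level
def chainRep (l : List Char) : List Char :=
  rep2 'O' 'E' 'Ø' (rep2 'A' 'E' 'Æ' (rep2 'A' 'A' 'Å' (rep2 'o' 'e' 'ø' (rep2 'a' 'e' 'æ' (rep2 'a' 'a' 'å' l)))))

theorem chain_nil : chainRep [] = [] := by simp [chainRep, rep2]
theorem chain_one (c : Char) : chainRep [c] = [c] := by simp [chainRep, rep2]

theorem chain_aa (t : List Char) : chainRep ('a' :: 'a' :: t) = 'å' :: chainRep t := by
  simp [chainRep, rep2_match, rep2_cons_ne]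

theorem chain_ae (t : List Char) : chainRep ('a' :: 'e' :: t) = 'æ' :: chainRep t := by
  simp [chainRep, rep2_match, rep2_miss, rep2_cons_ne]

theorem chain_oe (t : List Char) : chainRep ('o' :: 'e' :: t) = 'ø' :: chainRep t := by
  simp [chainRep, rep2_match, rep2_cons_ne]

theorem chain_AA (t : List Char) : chainRep ('A' :: 'A' :: t) = 'Å' :: chainRep t := by
  simp [chainRep, rep2_match, rep2_cons_ne]

theorem chain_AE (t : List Char) : chainRep ('A' :: 'E' :: t) = 'Æ' :: chainRep t := by
  simp [chainRep, rep2_match, rep2_miss, rep2_cons_ne]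

theorem chain_OE (t : List Char) : chainRep ('O' :: 'E' :: t) = 'Ø' :: chainRep t := by
  simp [chainRep, rep2_match, rep2_cons_ne]

set_option maxHeartbeats 1000000 in
theorem chain_pass (c d : Char) (t : List Char)
    (h1 : ¬(c = 'a' ∧ d = 'a')) (h2 : ¬(c = 'a' ∧ d = 'e')) (h3 : ¬(c = 'o' ∧ d = 'e'))
    (h4 : ¬(c = 'A' ∧ d = 'A')) (h5 : ¬(c = 'A' ∧ d = 'E')) (h6 : ¬(c = 'O' ∧ d = 'E')) :
    chainRep (c :: d :: t) = c :: chainRep (d :: t) := by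
  have p1 : rep2 'a' 'a' 'å' (c :: d :: t) = c :: (rep2 'a' 'a' 'å' (d :: t)) := rep2_miss _ _ h1
  have q1 : ((rep2 'a' 'a' 'å' (d :: t))).head? = some d ∨ ((rep2 'a' 'a' 'å' (d :: t))).head? = some 'å' := by simpa using rep2_head? 'a' 'a' 'å' (d :: t)
  have p2 : rep2 'a' 'e' 'æ' (c :: (rep2 'a' 'a' 'å' (d :: t))) = c :: (rep2 'a' 'e' 'æ' (rep2 'a' 'a' 'å' (d :: t))) := by
    apply rep2_cons_of
    intro d' hd'
    rcases q1 with h | h <;> rw [hd'] at h <;> injection h with h <;> subst h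
    · exact h2
    · rintro ⟨-, he⟩; exact absurd he (by decide)
  have q2 : ((rep2 'a' 'e' 'æ' (rep2 'a' 'a' 'å' (d :: t)))).head? = some d ∨ ((rep2 'a' 'e' 'æ' (rep2 'a' 'a' 'å' (d :: t)))).head? = some 'å' ∨ ((rep2 'a' 'e' 'æ' (rep2 'a' 'a' 'å' (d :: t)))).head? = some 'æ' := by
    rcases rep2_head? 'a' 'e' 'æ' (rep2 'a' 'a' 'å' (d :: t)) with h | h
    · rw [h]; tauto
    · tauto
  have p3 : rep2 'o' 'e' 'ø' (c :: (rep2 'a' 'e' 'æ' (rep2 'a' 'a' 'å' (d :: t)))) = c :: (rep2 'o' 'e' 'ø' (rep2 'a' 'e' 'æ' (rep2 'a' 'a' 'å' (d :: t)))) := by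
    apply rep2_cons_of
    intro d' hd'
    rcases q2 with h | h | h <;> rw [hd'] at h <;> injection h with h <;> subst h
    · exact h3
    · rintro ⟨-, he⟩; exact absurd he (by decide)
    · rintro ⟨-, he⟩; exact absurd he (by decide)
  have q3 : ((rep2 'o' 'e' 'ø' (rep2 'a' 'e' 'æ' (rep2 'a' 'a' 'å' (d :: t))))).head? = some d ∨ ((rep2 'o' 'e' 'ø' (rep2 'a' 'e' 'æ' (rep2 'a' 'a' 'å' (d :: t))))).head? = some 'å' ∨ ((rep2 'o' 'e' 'ø' (rep2 'a' 'e' 'æ' (rep2 'a' 'a' 'å' (d :: t))))).head? = some 'æ' ∨ ((rep2 'o' 'e' 'ø' (rep2 'a' 'e' 'æ' (rep2 'a' 'a' 'å' (d :: t))))).head? = some 'ø' := by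
    rcases rep2_head? 'o' 'e' 'ø' (rep2 'a' 'e' 'æ' (rep2 'a' 'a' 'å' (d :: t))) with h | h
    · rw [h]; rcases q2 with h' | h' | h' <;> simp [h']
    · simp [h]
  have p4 : rep2 'A' 'A' 'Å' (c :: (rep2 'o' 'e' 'ø' (rep2 'a' 'e' 'æ' (rep2 'a' 'a' 'å' (d :: t))))) = c :: (rep2 'A' 'A' 'Å' (rep2 'o' 'e' 'ø' (rep2 'a' 'e' 'æ' (rep2 'a' 'a' 'å' (d :: t))))) := by
    apply rep2_cons_of
    intro d' hd'
    rcases q3 with h | h | h | h <;> rw [hd'] at h <;> injection h with h <;> subst h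
    · exact h4
    · rintro ⟨-, he⟩; exact absurd he (by decide)
    · rintro ⟨-, he⟩; exact absurd he (by decide)
    · rintro ⟨-, he⟩; exact absurd he (by decide)
  have q4 : ((rep2 'A' 'A' 'Å' (rep2 'o' 'e' 'ø' (rep2 'a' 'e' 'æ' (rep2 'a' 'a' 'å' (d :: t)))))).head? = some d ∨ ((rep2 'A' 'A' 'Å' (rep2 'o' 'e' 'ø' (rep2 'a' 'e' 'æ' (rep2 'a' 'a' 'å' (d :: t)))))).head? = some 'å' ∨ ((rep2 'A' 'A' 'Å' (rep2 'o' 'e' 'ø' (rep2 'a' 'e' 'æ' (rep2 'a' 'a' 'å' (d :: t)))))).head? = some 'æ' ∨ ((rep2 'A' 'A' 'Å' (rep2 'o' 'e' 'ø' (rep2 'a' 'e' 'æ' (rep2 'a' 'a' 'å' (d :: t)))))).head? = some 'ø' ∨ ((rep2 'A' 'A' 'Å' (rep2 'o' 'e' 'ø' (rep2 'a' 'e' 'æ' (rep2 'a' 'a' 'å' (d :: t)))))).head? = some 'Å' := by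
    rcases rep2_head? 'A' 'A' 'Å' (rep2 'o' 'e' 'ø' (rep2 'a' 'e' 'æ' (rep2 'a' 'a' 'å' (d :: t)))) with h | h
    · rw [h]; rcases q3 with h' | h' | h' | h' <;> simp [h']
    · simp [h]
  have p5 : rep2 'A' 'E' 'Æ' (c :: (rep2 'A' 'A' 'Å' (rep2 'o' 'e' 'ø' (rep2 'a' 'e' 'æ' (rep2 'a' 'a' 'å' (d :: t)))))) = c :: (rep2 'A' 'E' 'Æ' (rep2 'A' 'A' 'Å' (rep2 'o' 'e' 'ø' (rep2 'a' 'e' 'æ' (rep2 'a' 'a' 'å' (d :: t)))))) := by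
    apply rep2_cons_of
    intro d' hd'
    rcases q4 with h | h | h | h | h <;> rw [hd'] at h <;> injection h with h <;> subst h
    · exact h5
    · rintro ⟨-, he⟩; exact absurd he (by decide)
    · rintro ⟨-, he⟩; exact absurd he (by decide)
    · rintro ⟨-, he⟩; exact absurd he (by decide)
    · rintro ⟨-, he⟩; exact absurd he (by decide)
  have q5 : ((rep2 'A' 'E' 'Æ' (rep2 'A' 'A' 'Å' (rep2 'o' 'e' 'ø' (rep2 'a' 'e' 'æ' (rep2 'a' 'a' 'å' (d :: t))))))).head? = some d ∨ ((rep2 'A' 'E' 'Æ' (rep2 'A' 'A' 'Å' (rep2 'o' 'e' 'ø' (rep2 'a' 'e' 'æ' (rep2 'a' 'a' 'å' (d :: t))))))).head? = some 'å' ∨ ((rep2 'A' 'E' 'Æ' (rep2 'A' 'A' 'Å' (rep2 'o' 'e' 'ø' (rep2 'a' 'e' 'æ' (rep2 'a' 'a' 'å' (d :: t))))))).head? = some 'æ' ∨ ((rep2 'A' 'E' 'Æ' (rep2 'A' 'A' 'Å' (rep2 'o' 'e' 'ø' (rep2 'a' 'e' 'æ' (rep2 'a' 'a' 'å' (d ::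 t))))))).head? = some 'ø' ∨ ((rep2 'A' 'E' 'Æ' (rep2 'A' 'A' 'Å' (rep2 'o' 'e' 'ø' (rep2 'a' 'e' 'æ' (rep2 'a' 'a' 'å' (d :: t))))))).head? = some 'Å' ∨ ((rep2 'A' 'E' 'Æ' (rep2 'A' 'A' 'Å' (rep2 'o' 'e' 'ø' (rep2 'a' 'e' 'æ' (rep2 'a' 'a' 'å' (d :: t))))))).head? = some 'Æ' := by
    rcases rep2_head? 'A' 'E' 'Æ' (rep2 'A' 'A' 'Å' (rep2 'o' 'e' 'ø' (rep2 'a' 'e' 'æ' (rep2 'a' 'a' 'å' (d :: t))))) with h | h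
    · rw [h]; rcases q4 with h' | h' | h' | h' | h' <;> simp [h']
    · simp [h]
  have p6 : rep2 'O' 'E' 'Ø' (c :: (rep2 'A' 'E' 'Æ' (rep2 'A' 'A' 'Å' (rep2 'o' 'e' 'ø' (rep2 'a' 'e' 'æ' (rep2 'a' 'a' 'å' (d :: t))))))) = c :: (rep2 'O' 'E' 'Ø' (rep2 'A' 'E' 'Æ' (rep2 'A' 'A' 'Å' (rep2 'o' 'e' 'ø' (rep2 'a' 'e' 'æ' (rep2 'a' 'a' 'å' (d :: t))))))) := by
    apply rep2_cons_of
    intro d' hd'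
    rcases q5 with h | h | h | h | h | h <;> rw [hd'] at h <;> injection h with h <;> subst h
    · exact h6
    · rintro ⟨-, he⟩; exact absurd he (by decide)
    · rintro ⟨-, he⟩; exact absurd he (by decide)
    · rintro ⟨-, he⟩; exact absurd he (by decide)
    · rintro ⟨-, he⟩; exact absurd he (by decide)
    · rintro ⟨-, he⟩; exact absurd he (by decide)
  unfold chainRep
  rw [p1, p2, p3, p4, p5, p6]

-- evaluating B's dict lookup on a variable two-char slice
theorem getB_pair (c d : Char) :
    norwMapB.get? [c, d] =
      if c = 'a' ∧ d = 'a' then some ['å'] else if c = 'a' ∧ d = 'e' then some ['æ']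
      else if c = 'o' ∧ d = 'e' then some ['ø'] else if c = 'A' ∧ d = 'A' then some ['Å']
      else if c = 'A' ∧ d = 'E' then some ['Æ'] else if c = 'O' ∧ d = 'E' then some ['Ø']
      else none := by
  split_ifs with i1 i2 i3 i4 i5 i6
  · obtain ⟨rfl, rfl⟩ := i1; rfl
  · obtain ⟨rfl, rfl⟩ := i2; rfl
  · obtain ⟨rfl, rfl⟩ := i3; rfl
  · obtain ⟨rfl, rfl⟩ := i4; rfl
  · obtain ⟨rfl, rfl⟩ := i5; rfl
  · obtain ⟨rfl, rfl⟩ := i6; rfl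
  · rw [PySem.Dict.get?]
    have hnone : List.find? (fun p => p.1 == [c, d]) norwMapB.items = none := by
      apply List.find?_eq_none.mpr
      intro pr hpr
      have : pr ∈ [((['a','a'] : List Char), (['å'] : List Char)), (['a','e'], ['æ']), (['o','e'], ['ø']),
          (['A','A'], ['Å']), (['A','E'], ['Æ']), (['O','E'], ['Ø'])] := hpr
      simp only [List.mem_cons, List.not_mem_nil, or_false] at this
      rcases this with rfl | rfl | rfl | rfl | rfl | rfl <;>
        · simp only [beq_iff_eq, List.cons.injEq, and_true]
          rintro ⟨e1, e2⟩
          first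
          | exact i1 ⟨e1.symm, e2.symm⟩
          | exact i2 ⟨e1.symm, e2.symm⟩
          | exact i3 ⟨e1.symm, e2.symm⟩
          | exact i4 ⟨e1.symm, e2.symm⟩
          | exact i5 ⟨e1.symm, e2.symm⟩
          | exact i6 ⟨e1.symm, e2.symm⟩
    rw [hnone]
    rfl

theorem getB_single (c : Char) : norwMapB.get? [c] = none := by
  have hit : norwMapB.items =
      [(['a','a'], ['å']), (['a','e'], ['æ']), (['o','e'], ['ø']),
       (['A','A'], ['Å']), (['A','E'], ['Æ']), (['O','E'], ['Ø'])] := by rfl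
  rw [PySem.Dict.get?, hit]
  simp [List.find?]

theorem chain_eq_altGo : ∀ (n : Nat) (l : List Char), l.length ≤ n → chainRep l = altGo l := by
  intro n
  induction n with
  | zero =>
    intro l h
    have : l = [] := by cases l <;> simp_all
    subst this
    rw [chain_nil, altGo]
  | succ n ih =>
    intro l h
    match l with
    | [] => rw [chain_nil, altGo]
    | [c] =>
      rw [chain_one, altGo]
      simp only [List.take, getB_single]
      rw [altGo]
    | c :: d :: t =>
      have ht : t.length ≤ n := by simp at h; omega
      have ht' : (d :: t).length ≤ n := by simp at h ⊢; omega
      rw [altGo]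
      simp only [List.take_succ_cons, List.take_succ_cons, List.take_zero, getB_pair]
      by_cases k1 : c = 'a' ∧ d = 'a'
      · obtain ⟨rfl, rfl⟩ := k1
        rw [if_pos ⟨rfl, rfl⟩]
        simp only [List.drop_succ_cons, List.drop_zero, List.cons_append, List.nil_append]
        rw [chain_aa, ih t ht]
      · rw [if_neg k1]
        by_cases k2 : c = 'a' ∧ d = 'e'
        · obtain ⟨rfl, rfl⟩ := k2
          rw [if_pos ⟨rfl, rfl⟩]
          simp only [List.drop_succ_cons, List.drop_zero, List.cons_append, List.nil_append]
          rw [chain_ae, ih t ht]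
        · rw [if_neg k2]
          by_cases k3 : c = 'o' ∧ d = 'e'
          · obtain ⟨rfl, rfl⟩ := k3
            rw [if_pos ⟨rfl, rfl⟩]
            simp only [List.drop_succ_cons, List.drop_zero, List.cons_append, List.nil_append]
            rw [chain_oe, ih t ht]
          · rw [if_neg k3]
            by_cases k4 : c = 'A' ∧ d = 'A'
            · obtain ⟨rfl, rfl⟩ := k4
              rw [if_pos ⟨rfl, rfl⟩]
              simp only [List.drop_succ_cons, List.drop_zero, List.cons_append, List.nil_append]
              rw [chain_AA, ih t ht]
            · rw [if_neg k4]
              by_cases k5 : c = 'A' ∧ d = 'E'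
              · obtain ⟨rfl, rfl⟩ := k5
                rw [if_pos ⟨rfl, rfl⟩]
                simp only [List.drop_succ_cons, List.drop_zero, List.cons_append, List.nil_append]
                rw [chain_AE, ih t ht]
              · rw [if_neg k5]
                by_cases k6 : c = 'O' ∧ d = 'E'
                · obtain ⟨rfl, rfl⟩ := k6
                  rw [if_pos ⟨rfl, rfl⟩]
                  simp only [List.drop_succ_cons, List.drop_zero, List.cons_append, List.nil_append]
                  rw [chain_OE, ih t ht]
                · rw [if_neg k6]
                  rw [chain_pass c d t k1 k2 k3 k4 k5 k6, ih (d :: t) ht']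

theorem portA_toList (s : String) : (ascii_to_norwegian s).toList = chainRep s.toList := by
  have hit : norwMapping.items =
      [("aa", "å"), ("ae", "æ"), ("oe", "ø"), ("AA", "Å"), ("AE", "Æ"), ("OE", "Ø")] := by rfl
  rw [ascii_to_norwegian, hit]
  simp only [List.foldl_cons, List.foldl_nil, PySem.Str.toList_replace]
  rw [show "aa".toList = ['a','a'] by decide, show "å".toList = ['å'] by decide,
      show "ae".toList = ['a','e'] by decide, show "æ".toList = ['æ'] by decide,
      show "oe".toList = ['o','e'] by decide, show "ø".toList = ['ø'] by decide,
      show "AA".toList = ['A','A'] by decide, show "Å".toList = ['Å'] by decide,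
      show "AE".toList = ['A','E'] by decide, show "Æ".toList = ['Æ'] by decide,
      show "OE".toList = ['O','E'] by decide, show "Ø".toList = ['Ø'] by decide]
  simp only [replace_eq_rep2]
  rfl

-- ===== VERDICT (by name: the statement is the Claim_ definition above) =====
theorem ascii_to_norwegian_spec : Claim_equal_ascii_to_norwegian := by
  intro s _
  unfold Spec_ascii_to_norwegian
  have h1 := portA_toList s
  have h2 : (ascii_to_norwegian_alt s).toList = altGo s.toList := by
    simp [ascii_to_norwegian_alt]
  have h3 := chain_eq_altGo s.toList.length s.toList le_rfl
  have : (ascii_to_norwegian s).toList = (ascii_to_norwegian_alt s).toList := by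
    rw [h1, h2, h3]
  exact String.toList_injective this
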